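-- pv_equiv track=rewrite | github.com/MuhammadMehdiRaza/AI_Semester_Project | AI_Project/data/generated_dataset/files/code_trans_589.py | fn_1
-- ===== SOURCE A (Python) =====
-- def fn_1(val_1: int, val_3: int) -> str:
--     """
--     Take in 2 integers, convert them to binary,
--     return val_1 binary number that is the
--     result of val_1 binary xor operation on the integers provided.
--
--     >>> fn_1(25, 32)
--     '0b111001'
--     >>> fn_1(37, 50)
--     '0b010111'
--     >>> fn_1(21, 30)
--     '0b01011'
--     >>> fn_1(58, 73)
--     '0b1110011'
--     >>> fn_1(0, 255)
--     '0b11111111'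
--     >>> fn_1(256, 256)
--     '0b000000000'
--     >>> fn_1(0, -1)
--     Traceback (most recent call last):
--         ...
--     ValueError: the value of both inputs must be positive
--     >>> fn_1(0, 1.1)
--     Traceback (most recent call last):
--         ...
--     TypeError: 'float' object cannot be interpreted as an integer
--     >>> fn_1("0", "1")
--     Traceback (most recent call last):
--         ...
--     TypeError: '<' not supported between instances of 'str' and 'int'
--     """
--     if val_1 < 0 or val_3 < 0:
--         raise ValueError("the value of both inputs must be positive")
--
--     val_2 = str(bin(val_1))[2:]  # remove the leading "0b"
--     val_4 = str(bin(val_3))[2:]  # remove the leading "0b"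
--
--     val_7 = max(len(val_2), len(val_4))
--
--     return "0b" + "".join(
--         str(int(val_5 != val_6))
--         for val_5, val_6 in zip(val_2.zfill(val_7), val_4.zfill(val_7))
--     )
-- ===== SOURCE B (Python) =====
-- def fn_1(val_1: int, val_3: int) -> str:
--     if val_1 < 0 or val_3 < 0:
--         raise ValueError("the value of both inputs must be positive")
--     s1 = bin(val_1)[2:]
--     s2 = bin(val_3)[2:]
--     width = max(len(s1), len(s2))
--     return "0b" + bin(val_1 ^ val_3)[2:].zfill(width)
-- ===== Notes on version B (the rewrite author's own statement) =====
-- stated objective: simpler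
-- what changed: Replaces the per-digit zip/compare string construction with a single integer XOR whose binary rendering is zero-padded to the max operand bit-string width.
import Mathlib
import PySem

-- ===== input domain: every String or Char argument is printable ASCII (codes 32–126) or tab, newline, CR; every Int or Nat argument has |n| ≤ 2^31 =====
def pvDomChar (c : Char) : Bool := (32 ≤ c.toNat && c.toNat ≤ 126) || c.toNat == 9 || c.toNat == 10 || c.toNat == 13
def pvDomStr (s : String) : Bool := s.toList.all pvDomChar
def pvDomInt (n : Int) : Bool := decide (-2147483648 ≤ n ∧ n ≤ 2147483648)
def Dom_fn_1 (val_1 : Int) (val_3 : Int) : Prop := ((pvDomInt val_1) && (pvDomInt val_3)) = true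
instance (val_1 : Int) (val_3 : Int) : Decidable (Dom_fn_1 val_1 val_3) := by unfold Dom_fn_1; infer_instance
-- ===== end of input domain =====

-- B replaces A's per-digit zip/compare construction by a single integer XOR zero-padded to the
-- max operand bit-string width (objective: simpler).

-- ===== PORT A =====
-- bin(n)[2:] for n ≥ 1, MSB first (exact for nonnegative ints)
def pvBits (n : Nat) : List Char :=
  if h : n = 0 then [] else pvBits (n / 2) ++ [if n % 2 = 1 then '1' else '0']
  decreasing_by exact Nat.div_lt_self (Nat.pos_of_ne_zero h) (by norm_num)

-- str(bin(n))[2:]  (Python renders 0 as "0")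
def pvBin (n : Nat) : List Char := if n = 0 then ['0'] else pvBits n

-- s.zfill(w): pad with '0' on the left up to width w (never truncates)
def pvZfill (s : List Char) (w : Nat) : List Char := List.replicate (w - s.length) '0' ++ s

def fn_1 (val_1 : Int) (val_3 : Int) : String :=
  -- the Python raises ValueError on negative input; Pre_fn_1 excludes that
  let val_2 := pvBin val_1.toNat
  let val_4 := pvBin val_3.toNat
  let val_7 := max val_2.length val_4.length
  "0b" ++ String.mk (((pvZfill val_2 val_7).zip (pvZfill val_4 val_7)).map
    (fun p => if p.1 ≠ p.2 then '1' else '0'))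

-- ===== PORT B =====
def fn_1_alt (val_1 : Int) (val_3 : Int) : String :=
  let s1 := pvBin val_1.toNat
  let s2 := pvBin val_3.toNat
  let width := max s1.length s2.length
  "0b" ++ String.mk (pvZfill (pvBin (val_1.toNat ^^^ val_3.toNat)) width)

-- ===== PRECONDITION & SPEC =====
-- A (and B) raise ValueError when either input is negative; Pre_ excludes exactly those inputs.
def Pre_fn_1 (val_1 : Int) (val_3 : Int) : Prop := 0 ≤ val_1 ∧ 0 ≤ val_3
instance (val_1 : Int) (val_3 : Int) : Decidable (Pre_fn_1 val_1 val_3) := by unfold Pre_fn_1; infer_instance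
def pvWitness_fn_1 : Int × Int := (25, 32)

def Spec_fn_1 (val_1 : Int) (val_3 : Int) (out : String) : Prop := out = fn_1_alt val_1 val_3
instance (val_1 : Int) (val_3 : Int) (out : String) : Decidable (Spec_fn_1 val_1 val_3 out) := by unfold Spec_fn_1; infer_instance

-- ===== CLAIM (what is proved, stated in full; the proofs are below) =====
def Claim_equal_fn_1 : Prop := ∀ (val_1 : Int) (val_3 : Int), Dom_fn_1 val_1 val_3 → Pre_fn_1 val_1 val_3 → Spec_fn_1 val_1 val_3 (fn_1 val_1 val_3)

-- ===== LEMMAS AND PROOFS =====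

-- fixed-width binary rendering, MSB first
def pvBitsLen : Nat → Nat → List Char
  | 0, _ => []
  | k + 1, n => pvBitsLen k (n / 2) ++ [if n % 2 = 1 then '1' else '0']

theorem pvBitsLen_length (w n : Nat) : (pvBitsLen w n).length = w := by
  induction w generalizing n with
  | zero => rfl
  | succ k ih => simp [pvBitsLen, ih]

theorem pvBitsLen_zero (w : Nat) : pvBitsLen w 0 = List.replicate w '0' := by
  induction w with
  | zero => rfl
  | succ k ih => simp [pvBitsLen, ih, List.replicate_succ']

theorem pvZfill_bits (w : Nat) : ∀ n, 1 ≤ n → n < 2 ^ w → pvZfill (pvBits n) w = pvBitsLen w n := by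
  induction w with
  | zero => intro n h1 h2; omega
  | succ k ih =>
    intro n h1 h2
    rw [pvBits, dif_neg (by omega)]
    have hdiv : n / 2 < 2 ^ k := by
      have := Nat.pow_succ 2 k
      omega
    by_cases hz : n / 2 = 0
    · rw [hz, pvBits, dif_pos rfl, pvBitsLen, hz, pvBitsLen_zero]
      simp [pvZfill]
    · rw [pvBitsLen, ← ih (n / 2) (by omega) hdiv]
      simp [pvZfill, List.append_assoc]
theorem pvZfill_bin {w n : Nat} (hw : 1 ≤ w) (h : n < 2 ^ w) :
    pvZfill (pvBin n) w = pvBitsLen w n := by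
  by_cases hz : n = 0
  · subst hz
    rw [pvBin, if_pos rfl, pvBitsLen_zero, pvZfill]
    simp only [List.length_singleton]
    rw [show w = (w - 1) + 1 by omega, List.replicate_succ']
    simp
  · rw [pvBin, if_neg hz, pvZfill_bits w n (by omega) h]

theorem pvBitsLen_xor (w : Nat) : ∀ m k : Nat,
    ((pvBitsLen w m).zip (pvBitsLen w k)).map (fun p => if p.1 ≠ p.2 then '1' else '0')
      = pvBitsLen w (m ^^^ k) := by
  induction w with
  | zero => intro m k; rfl
  | succ j ih =>
    intro m k
    have hdiv : (m ^^^ k) / 2 = m / 2 ^^^ k / 2 := by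
      simpa [Nat.shiftRight_succ, Nat.div_div_eq_div_mul] using
        (Nat.shiftRight_xor_distrib (a := m) (b := k) (i := 1))
    rw [pvBitsLen, pvBitsLen, pvBitsLen, hdiv,
      List.zip_append (by rw [pvBitsLen_length, pvBitsLen_length]), List.map_append, ih]
    congr 1
    rcases Nat.mod_two_eq_zero_or_one m with h | h <;>
      rcases Nat.mod_two_eq_zero_or_one k with h2 | h2 <;>
        simp [h, h2, Nat.xor_mod_two_eq, Nat.add_mod]

theorem pvBits_lt (n : Nat) : n < 2 ^ (pvBits n).length := by
  induction n using Nat.strong_induction_on with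
  | _ n ih =>
    by_cases hz : n = 0
    · subst hz; simp [pvBits]
    · rw [pvBits, dif_neg hz]
      have := ih (n / 2) (Nat.div_lt_self (Nat.pos_of_ne_zero hz) (by norm_num))
      simp only [List.length_append, List.length_singleton, Nat.pow_succ]
      omega

theorem pvBin_lt (n : Nat) : n < 2 ^ (pvBin n).length := by
  by_cases hz : n = 0
  · subst hz; simp [pvBin]
  · rw [pvBin, if_neg hz]; exact pvBits_lt n

theorem pvBin_len_pos (n : Nat) : 1 ≤ (pvBin n).length := by
  by_cases hz : n = 0
  · subst hz; simp [pvBin]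
  · rw [pvBin, if_neg hz, pvBits, dif_neg hz]; simp

theorem fn_1_lists (a b : Nat) :
    ((pvZfill (pvBin a) (max (pvBin a).length (pvBin b).length)).zip
        (pvZfill (pvBin b) (max (pvBin a).length (pvBin b).length))).map
      (fun p => if p.1 ≠ p.2 then '1' else '0')
      = pvZfill (pvBin (a ^^^ b)) (max (pvBin a).length (pvBin b).length) := by
  have hw1 : 1 ≤ max (pvBin a).length (pvBin b).length :=
    le_trans (pvBin_len_pos a) (le_max_left _ _)
  have ha : a < 2 ^ max (pvBin a).length (pvBin b).length :=
    lt_of_lt_of_le (pvBin_lt a) (Nat.pow_le_pow_right (by norm_num) (le_max_left _ _))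
  have hb : b < 2 ^ max (pvBin a).length (pvBin b).length :=
    lt_of_lt_of_le (pvBin_lt b) (Nat.pow_le_pow_right (by norm_num) (le_max_right _ _))
  rw [pvZfill_bin hw1 ha, pvZfill_bin hw1 hb,
    pvZfill_bin hw1 (Nat.xor_lt_two_pow ha hb), pvBitsLen_xor]

-- ===== VERDICT (by name: the statement is the Claim_ definition above) =====
theorem fn_1_spec : Claim_equal_fn_1 := by
  intro val_1 val_3 _ _
  simp only [Spec_fn_1, fn_1, fn_1_alt, fn_1_lists]
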